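-- pv_equiv track=rewrite | github.com/Xpehutta/giga4sql | Classes/validation_classes.py | validate_unique_sources
-- ===== SOURCE A (Python) =====
-- def validate_unique_sources(sources):
--     """Validate sources are unique (flavor-agnostic)."""
--     seen = set()
--     duplicates = []
--     for source in sources:
--         if source.lower() in seen:
--             duplicates.append(source)
--         else:
--             seen.add(source.lower())
--     if duplicates:
--         return False, f"Duplicate sources found: {duplicates}"
--     return True, "All sources are unique"
-- ===== SOURCE B (Python) =====
-- def validate_unique_sources(sources):
--     """Validate sources are unique (flavor-agnostic)."""
--     remaining = {}
--     for s in sources: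
--         low = s.lower()
--         remaining[low] = remaining.get(low, 0) + 1
--     duplicates = []
--     for s in reversed(sources):
--         low = s.lower()
--         remaining[low] -= 1
--         if remaining[low] > 0:
--             duplicates.append(s)
--     duplicates.reverse()
--     if duplicates:
--         return False, f"Duplicate sources found: {duplicates}"
--     return True, "All sources are unique"
-- ===== Notes on version B (the rewrite author's own statement) =====
-- stated objective: alternative
-- what changed: Replaced the forward single pass with a lowercase seen-set by a counting algorithm: a first pass builds a dict of lowercase occurrence counts, then a backward pass decrements the counter and collects an element when earlier occurrences remain, building the duplicate list back-to-front and reversing it.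
import Mathlib
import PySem

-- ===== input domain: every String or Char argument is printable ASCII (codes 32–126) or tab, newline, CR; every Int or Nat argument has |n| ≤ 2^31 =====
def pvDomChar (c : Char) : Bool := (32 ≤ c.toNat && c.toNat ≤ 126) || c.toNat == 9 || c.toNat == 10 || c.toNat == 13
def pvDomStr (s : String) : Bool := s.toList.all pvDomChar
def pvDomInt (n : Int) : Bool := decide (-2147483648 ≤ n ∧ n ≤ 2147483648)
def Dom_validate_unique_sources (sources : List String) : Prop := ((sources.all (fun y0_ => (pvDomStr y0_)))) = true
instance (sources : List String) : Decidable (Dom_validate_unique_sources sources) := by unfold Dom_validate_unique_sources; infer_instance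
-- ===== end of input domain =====

-- B replaces the forward seen-set pass by a counting algorithm: one pass builds a dict of
-- lowercase occurrence counts, then a backward pass decrements the counter and keeps an
-- element when earlier occurrences remain, building the duplicate list back-to-front.

-- Shared message formatting: Python's f"{duplicates}" uses repr() of each string element.
-- Exact on the domain's characters (printable ASCII plus tab/newline/CR): printable chars
-- other than backslash/the chosen quote are shown as-is; tab/newline/CR become \t \n \r.
def pvReprQuote (s : List Char) : Char :=
  if s.contains '\'' && !s.contains '"' then '"' else '\''

def pvReprChar (q c : Char) : List Char :=
  if c = '\\' then ['\\', '\\']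
  else if c = q then ['\\', q]
  else if c = '\t' then ['\\', 't']
  else if c = '\n' then ['\\', 'n']
  else if c = '\r' then ['\\', 'r']
  else [c]

def pvReprStr (s : String) : String :=
  let cs := s.toList
  let q := pvReprQuote cs
  String.ofList ([q] ++ cs.flatMap (pvReprChar q) ++ [q])

def pvReprList (l : List String) : String :=
  PySem.Str.join "" ["[", PySem.Str.join ", " (l.map pvReprStr), "]"]

-- ===== PORT A =====
-- the for-loop of A: state (seen, duplicates)
def pvLoopA : List String → PySem.Set String → List String → PySem.Set String × List String
  | [], seen, dup => (seen, dup)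
  | s :: rest, seen, dup =>
      if PySem.Set.contains seen (PySem.Str.lower s) then
        pvLoopA rest seen (dup ++ [s])
      else
        pvLoopA rest (PySem.Set.add seen (PySem.Str.lower s)) dup

def validate_unique_sources (sources : List String) : Bool × String :=
  let duplicates := (pvLoopA sources PySem.Set.empty []).2
  if duplicates ≠ [] then
    (false, PySem.Str.join "" ["Duplicate sources found: ", pvReprList duplicates])
  else
    (true, "All sources are unique")

-- ===== PORT B =====
-- first loop of B: remaining[low] = remaining.get(low, 0) + 1
def pvCountB : List String → PySem.Dict String Int → PySem.Dict String Int
  | [], d => d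
  | s :: rest, d =>
      pvCountB rest (d.insert (PySem.Str.lower s) (d.getD (PySem.Str.lower s) 0 + 1))

-- second loop of B, over reversed(sources): decrement, keep s when earlier copies remain
def pvBackB : List String → PySem.Dict String Int → List String → PySem.Dict String Int × List String
  | [], d, dup => (d, dup)
  | s :: rest, d, dup =>
      if (d.insert (PySem.Str.lower s) (d.getD (PySem.Str.lower s) 0 - 1)).getD (PySem.Str.lower s) 0 > 0 then
        pvBackB rest (d.insert (PySem.Str.lower s) (d.getD (PySem.Str.lower s) 0 - 1)) (dup ++ [s])
      else
        pvBackB rest (d.insert (PySem.Str.lower s) (d.getD (PySem.Str.lower s) 0 - 1)) dup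

def validate_unique_sources_alt (sources : List String) : Bool × String :=
  let remaining := pvCountB sources PySem.Dict.empty
  let duplicates := ((pvBackB sources.reverse remaining []).2).reverse
  if duplicates ≠ [] then
    (false, PySem.Str.join "" ["Duplicate sources found: ", pvReprList duplicates])
  else
    (true, "All sources are unique")

-- ===== PRECONDITION & SPEC =====
def Spec_validate_unique_sources (sources : List String) (out : Bool × String) : Prop := out = validate_unique_sources_alt sources
instance (sources : List String) (out : Bool × String) : Decidable (Spec_validate_unique_sources sources out) := by unfold Spec_validate_unique_sources; infer_instance

-- ===== CLAIM (what is proved, stated in full; the proofs are below) =====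
def Claim_equal_validate_unique_sources : Prop := ∀ (sources : List String), Dom_validate_unique_sources sources → Spec_validate_unique_sources sources (validate_unique_sources sources)

-- ===== LEMMAS AND PROOFS =====

-- reference duplicate list: `pre` is the list of lowercased already-seen sources
def pvDups : List String → List String → List String
  | _, [] => []
  | pre, s :: rest =>
      (if pre.contains (PySem.Str.lower s) then [s] else [])
        ++ pvDups (pre ++ [PySem.Str.lower s]) rest

lemma pvLoopA_eq (rest : List String) : ∀ (pre : List String) (seen : PySem.Set String) (dup : List String),
    (∀ x, PySem.Set.contains seen x = pre.contains x) →
    (pvLoopA rest seen dup).2 = dup ++ pvDups pre rest := by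
  induction rest with
  | nil => intro pre seen dup _; simp [pvLoopA, pvDups]
  | cons s rest ih =>
    intro pre seen dup h
    by_cases hc : PySem.Set.contains seen (PySem.Str.lower s) = true
    · have hpre : pre.contains (PySem.Str.lower s) = true := by rw [← h]; exact hc
      have hmem : PySem.Str.lower s ∈ pre := by simpa using hpre
      rw [pvLoopA, if_pos hc, ih (pre ++ [PySem.Str.lower s]) seen (dup ++ [s])]
      · simp [pvDups, hmem]
      · intro x
        rw [h x]
        by_cases hx : x = PySem.Str.lower s
        · subst hx; simp [hmem]
        · simp [hx]
    · have hc' : PySem.Set.contains seen (PySem.Str.lower s) = false := by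
        simpa using hc
      have hpre : pre.contains (PySem.Str.lower s) = false := by rw [← h]; exact hc'
      have hnot : PySem.Str.lower s ∉ pre := by simpa using hpre
      rw [pvLoopA, if_neg hc, ih (pre ++ [PySem.Str.lower s]) _ dup]
      · simp [pvDups, hnot]
      · intro x
        have hmm : (x ∈ PySem.Set.add seen (PySem.Str.lower s)) ↔ (x ∈ seen ∨ x = PySem.Str.lower s) :=
          PySem.Set.mem_add seen (PySem.Str.lower s) x
        have hx0 : (x ∈ seen) ↔ (x ∈ pre) := by
          have := h x
          simpa [PySem.Set.contains] using this
        simp only [List.contains_append]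
        by_cases hx : x = PySem.Str.lower s
        · subst hx
          simp [PySem.Set.contains, hmm]
        · have h1 : (x ∈ PySem.Set.add seen (PySem.Str.lower s)) ↔ x ∈ seen := by
            rw [hmm]; simp [hx]
          simp [PySem.Set.contains, h1, hx0, hx]


lemma pvDups_append (xs : List String) : ∀ (ys pre : List String),
    pvDups pre (xs ++ ys) = pvDups pre xs ++ pvDups (pre ++ xs.map PySem.Str.lower) ys := by
  induction xs with
  | nil => intro ys pre; simp [pvDups]
  | cons s xs ih =>
    intro ys pre
    simp only [List.cons_append, pvDups, ih ys (pre ++ [PySem.Str.lower s]), List.map_cons,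
      List.append_assoc, List.nil_append]

lemma pvCountB_getD (xs : List String) : ∀ (d : PySem.Dict String Int) (k : String),
    (pvCountB xs d).getD k 0 = d.getD k 0 + ((xs.map PySem.Str.lower).count k : Int) := by
  induction xs with
  | nil => intro d k; simp [pvCountB]
  | cons s xs ih =>
    intro d k
    rw [pvCountB, ih]
    rw [PySem.Dict.getD_insert]
    by_cases hk : k = PySem.Str.lower s
    · subst hk
      simp
      ring
    · simp [hk, Ne.symm hk]

lemma pvBackB_eq (l : List String) : ∀ (d : PySem.Dict String Int) (dup : List String),
    (∀ k, d.getD k 0 = ((l.reverse.map PySem.Str.lower).count k : Int)) →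
    (pvBackB l d dup).2 = dup ++ (pvDups [] l.reverse).reverse := by
  induction l with
  | nil => intro d dup _; simp [pvBackB, pvDups]
  | cons s l ih =>
    intro d dup h
    have hcnt := h (PySem.Str.lower s)
    have hcons : (s :: l).reverse = l.reverse ++ [s] := by simp
    have hself : ((((s :: l).reverse).map PySem.Str.lower).count (PySem.Str.lower s) : Nat)
        = ((l.reverse.map PySem.Str.lower).count (PySem.Str.lower s)) + 1 := by
      rw [hcons]; simp [List.count_append]
    have hd' : ∀ k, (d.insert (PySem.Str.lower s) (d.getD (PySem.Str.lower s) 0 - 1)).getD k 0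
        = ((l.reverse.map PySem.Str.lower).count k : Int) := by
      intro k
      rw [PySem.Dict.getD_insert]
      by_cases hk : k = PySem.Str.lower s
      · subst hk
        rw [if_pos rfl, hcnt, hself]
        push_cast; ring
      · rw [if_neg hk, h k, hcons]
        simp [List.count_append, Ne.symm hk]
    have hsplit : pvDups [] ((s :: l).reverse)
        = pvDups [] l.reverse ++ (if ((l.reverse.map PySem.Str.lower).contains (PySem.Str.lower s)) then [s] else []) := by
      rw [hcons, pvDups_append]
      simp [pvDups]
    rw [pvBackB]
    by_cases hpos : (d.insert (PySem.Str.lower s) (d.getD (PySem.Str.lower s) 0 - 1)).getD (PySem.Str.lower s) 0 > 0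
    · rw [if_pos hpos, ih _ _ hd']
      have hgt : 0 < ((l.reverse.map PySem.Str.lower).count (PySem.Str.lower s)) := by
        have := hd' (PySem.Str.lower s)
        rw [this] at hpos
        exact_mod_cast hpos
      have hmem : ((l.reverse.map PySem.Str.lower).contains (PySem.Str.lower s)) = true := by
        simp only [List.contains_iff_mem]
        exact List.count_pos_iff.mp hgt
      rw [hsplit, hmem]
      simp
    · rw [if_neg hpos, ih _ _ hd']
      have hle : ((l.reverse.map PySem.Str.lower).count (PySem.Str.lower s) : Int) ≤ 0 := by
        have := hd' (PySem.Str.lower s)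
        rw [this] at hpos
        omega
      have hz : ((l.reverse.map PySem.Str.lower).count (PySem.Str.lower s)) = 0 := by
        exact_mod_cast le_antisymm (by exact_mod_cast hle) (Nat.zero_le _)
      have hmem : ((l.reverse.map PySem.Str.lower).contains (PySem.Str.lower s)) = false := by
        simpa using List.count_eq_zero.mp hz
      rw [hsplit, hmem]
      simp

-- ===== VERDICT (by name: the statement is the Claim_ definition above) =====
theorem validate_unique_sources_spec : Claim_equal_validate_unique_sources := by
  intro sources _
  unfold Spec_validate_unique_sources validate_unique_sources validate_unique_sources_alt
  dsimp only
  have hA : (pvLoopA sources PySem.Set.empty []).2 = pvDups [] sources := by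
    simpa using pvLoopA_eq sources [] PySem.Set.empty [] (by intro x; rfl)
  have hrem : ∀ k, (pvCountB sources PySem.Dict.empty).getD k 0
      = (((sources.reverse.reverse).map PySem.Str.lower).count k : Int) := by
    intro k
    rw [pvCountB_getD]
    simp
  have hB := pvBackB_eq sources.reverse (pvCountB sources PySem.Dict.empty) [] hrem
  rw [hA, hB]
  simp
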